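-- pv_equiv track=rewrite | github.com/canolmezoglu/DyNetiKAT | src/python/maude_parser.py | remove_unnecessary_parentheses_v6
-- ===== SOURCE A (Python) =====
-- def remove_unnecessary_parentheses_v6(text):
--     result = []
--     paren_stack = []
--
--     for idx, char in enumerate(text):
--         if char == '(':
--             if idx + 1 < len(text) and text[idx + 1] == '\n':
--                 continue
--             paren_stack.append(char)
--             result.append(char)
--         elif char == ')':
--             if paren_stack:
--                 paren_stack.pop()
--                 result.append(char)
--         else:
--             result.append(char)
--
--     return ''.join(result).strip()
-- ===== SOURCE B (Python) =====
-- def remove_unnecessary_parentheses_v6(text):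
--     # pass 1: drop each '(' that is immediately followed by a newline (backward check)
--     mid = []
--     for ch in text:
--         if ch == '\n' and mid and mid[-1] == '(':
--             mid.pop()
--         mid.append(ch)
--     # pass 2: drop unmatched ')' using an integer depth counter
--     out = []
--     depth = 0
--     for ch in mid:
--         if ch == '(':
--             depth += 1
--             out.append(ch)
--         elif ch == ')':
--             if depth > 0:
--                 depth -= 1
--                 out.append(ch)
--         else:
--             out.append(ch)
--     return ''.join(out).strip()
-- ===== Notes on version B (the rewrite author's own statement) =====
-- stated objective: alternative
-- what changed: A's single combined pass with an explicit paren stack is replaced by two passes: a backward-checking pass that pops a just-emitted open paren when the current char is a newline, then an integer-depth pass that drops unmatched close parens.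
import Mathlib
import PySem

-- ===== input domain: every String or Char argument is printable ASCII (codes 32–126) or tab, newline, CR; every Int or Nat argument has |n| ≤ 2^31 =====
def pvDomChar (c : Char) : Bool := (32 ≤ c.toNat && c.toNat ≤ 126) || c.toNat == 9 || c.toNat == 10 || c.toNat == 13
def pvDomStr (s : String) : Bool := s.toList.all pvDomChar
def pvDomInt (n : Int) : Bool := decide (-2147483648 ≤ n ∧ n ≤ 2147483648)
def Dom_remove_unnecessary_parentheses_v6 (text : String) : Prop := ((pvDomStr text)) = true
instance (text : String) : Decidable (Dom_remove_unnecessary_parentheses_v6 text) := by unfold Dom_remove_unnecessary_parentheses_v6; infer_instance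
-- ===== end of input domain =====

-- B replaces A's single combined pass with a paren stack by two passes (a backward newline pass
-- and an integer-depth pass); objective: alternative decomposition, same cost.

-- ===== PORT A =====
-- the single loop of A: state (result, paren_stack); idx tracks enumerate's index for text[idx+1]
def pvGoA (full : List Char) : List Char → Int → List Char × List Char → List Char × List Char
  | [], _, st => st
  | c :: rest, idx, (res, stk) =>
    if c = '(' then
      if idx + 1 < (full.length : Int) ∧ PySem.List.pyGet? full (idx + 1) = some '\n' then
        pvGoA full rest (idx + 1) (res, stk)          -- continue
      else
        pvGoA full rest (idx + 1) (res ++ [c], stk ++ [c])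
    else if c = ')' then
      if stk ≠ [] then
        pvGoA full rest (idx + 1) (res ++ [c], stk.dropLast)
      else
        pvGoA full rest (idx + 1) (res, stk)
    else
      pvGoA full rest (idx + 1) (res ++ [c], stk)

def remove_unnecessary_parentheses_v6 (text : String) : String :=
  PySem.Str.strip (String.mk (pvGoA text.toList text.toList 0 ([], [])).1)

-- ===== PORT B =====
-- pass 1: mid.pop() then mid.append(ch) when ch is '\n' and mid ends with '('
def pvPass1Step (mid : List Char) (ch : Char) : List Char :=
  if ch = '\n' ∧ mid ≠ [] ∧ mid.getLast? = some '(' then mid.dropLast ++ [ch] else mid ++ [ch]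

-- pass 2: (out, depth) accumulator
def pvPass2Step (st : List Char × Int) (ch : Char) : List Char × Int :=
  if ch = '(' then (st.1 ++ [ch], st.2 + 1)
  else if ch = ')' then (if st.2 > 0 then (st.1 ++ [ch], st.2 - 1) else st)
  else (st.1 ++ [ch], st.2)

def remove_unnecessary_parentheses_v6_alt (text : String) : String :=
  PySem.Str.strip (String.mk ((text.toList.foldl pvPass1Step []).foldl pvPass2Step ([], 0)).1)

-- ===== PRECONDITION & SPEC =====
def Spec_remove_unnecessary_parentheses_v6 (text : String) (out : String) : Prop := out = remove_unnecessary_parentheses_v6_alt text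
instance (text : String) (out : String) : Decidable (Spec_remove_unnecessary_parentheses_v6 text out) := by unfold Spec_remove_unnecessary_parentheses_v6; infer_instance

-- ===== CLAIM (what is proved, stated in full; the proofs are below) =====
def Claim_equal_remove_unnecessary_parentheses_v6 : Prop := ∀ (text : String), Dom_remove_unnecessary_parentheses_v6 text → Spec_remove_unnecessary_parentheses_v6 text (remove_unnecessary_parentheses_v6 text)

-- ===== LEMMAS AND PROOFS =====

-- reference: combined lookahead + depth recursion both ports are reduced to
def pvF : List Char → Int → List Char
  | [], _ => []
  | c :: rest, d =>
    if c = '(' then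
      if rest.head? = some '\n' then pvF rest d
      else c :: pvF rest (d + 1)
    else if c = ')' then
      if d > 0 then c :: pvF rest (d - 1) else pvF rest d
    else c :: pvF rest d

-- depth-only pass (what pass 2 computes)
def pvF2 : List Char → Int → List Char
  | [], _ => []
  | c :: rest, d =>
    if c = '(' then c :: pvF2 rest (d + 1)
    else if c = ')' then
      if d > 0 then c :: pvF2 rest (d - 1) else pvF2 rest d
    else c :: pvF2 rest d

-- lookahead-only removal (what pass 1 computes)
def pvG : List Char → List Char
  | [] => []
  | c :: rest => if c = '(' ∧ rest.head? = some '\n' then pvG rest else c :: pvG rest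

-- pass 1 with the previous emitted character made explicit
def pvH (c : Char) : List Char → List Char
  | [] => [c]
  | c' :: rest => if c' = '\n' ∧ c = '(' then pvH '\n' rest else c :: pvH c' rest

theorem pvFoldl1_eq_pvH (rest : List Char) : ∀ (acc : List Char) (c : Char),
    List.foldl pvPass1Step (acc ++ [c]) rest = acc ++ pvH c rest := by
  induction rest with
  | nil => intro acc c; simp [pvH]
  | cons c' r ih =>
    intro acc c
    have hl : (acc ++ [c]).getLast? = some c := by simp
    simp only [List.foldl, pvPass1Step, pvH]
    by_cases h : c' = '\n' ∧ c = '('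
    · have hne : acc ++ [c] ≠ [] := by simp
      rw [if_pos ⟨h.1, hne, by rw [hl, h.2]⟩, if_pos h]
      rw [show (acc ++ [c]).dropLast ++ [c'] = acc ++ [c'] by simp, h.1, ih]
    · have hng : ¬ (c' = '\n' ∧ acc ++ [c] ≠ [] ∧ (acc ++ [c]).getLast? = some '(') := by
        rw [hl]; simp only [Option.some.injEq]; tauto
      rw [if_neg hng, if_neg h, ih (acc ++ [c]) c']
      simp

theorem pvH_eq_pvG (rest : List Char) : ∀ c, pvH c rest = pvG (c :: rest) := by
  induction rest with
  | nil => intro c; simp [pvH, pvG]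
  | cons c' r ih =>
    intro c
    by_cases h : c' = '\n' ∧ c = '('
    · obtain ⟨h1, h2⟩ := h; subst h1; subst h2
      rw [show pvH '(' ('\n' :: r) = pvH '\n' r by simp [pvH], ih]
      simp [pvG, List.head?]
    · rw [show pvH c (c' :: r) = c :: pvH c' r by simp only [pvH, if_neg h], ih]
      have hng : ¬ (c = '(' ∧ (c' :: r).head? = some '\n') := by
        simp only [List.head?_cons, Option.some.injEq]; tauto
      conv_rhs => rw [pvG]
      rw [if_neg hng]

theorem pass1_eq_pvG (l : List Char) : List.foldl pvPass1Step [] l = pvG l := by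
  cases l with
  | nil => rfl
  | cons c rest =>
    have h0 := pvFoldl1_eq_pvH rest [] c
    simp only [List.nil_append] at h0
    simp only [List.foldl, pvPass1Step]
    have h1 : ¬ (c = '\n' ∧ ([] : List Char) ≠ [] ∧ ([] : List Char).getLast? = some '(') := by simp
    rw [if_neg h1, List.nil_append, h0, pvH_eq_pvG]

theorem pass2_eq_pvF2 (l : List Char) : ∀ (out : List Char) (d : Int),
    (List.foldl pvPass2Step (out, d) l).1 = out ++ pvF2 l d := by
  induction l with
  | nil => intro out d; simp [pvF2]
  | cons c rest ih =>
    intro out d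
    simp only [List.foldl, pvPass2Step, pvF2]
    by_cases h1 : c = '('
    · simp [if_pos h1, ih]
    by_cases h2 : c = ')'
    · simp only [if_neg h1, if_pos h2]
      by_cases h3 : d > 0
      · simp [if_pos h3, ih]
      · simp [if_neg h3, ih]
    · simp [if_neg h1, if_neg h2, ih]

-- the depth pass over the lookahead-filtered list is the combined recursion
theorem pvF2_pvG (l : List Char) : ∀ d, pvF2 (pvG l) d = pvF l d := by
  induction l with
  | nil => intro d; rfl
  | cons c rest ih =>
    intro d
    simp only [pvG]
    by_cases h : c = '(' ∧ rest.head? = some '\n'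
    · rw [if_pos h, ih]
      simp only [pvF, if_pos h.1, if_pos h.2]
    · rw [if_neg h]
      by_cases h1 : c = '('
      · have hn : ¬ rest.head? = some '\n' := fun hh => h ⟨h1, hh⟩
        simp only [pvF, pvF2, if_pos h1, if_neg hn, ih]
      by_cases h2 : c = ')'
      · simp only [pvF, pvF2, if_neg h1, if_pos h2]
        by_cases h3 : d > 0
        · rw [if_pos h3, if_pos h3, ih]
        · rw [if_neg h3, if_neg h3, ih]
      · simp only [pvF, pvF2, if_neg h1, if_neg h2, ih]

-- A's loop equals the combined recursion, with the stack abstracted to its length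
theorem pvGoA_eq_pvF (rest : List Char) : ∀ (pre res stk : List Char),
    (pvGoA (pre ++ rest) rest (pre.length : Int) (res, stk)).1 = res ++ pvF rest (stk.length : Int) := by
  induction rest with
  | nil => intro pre res stk; simp [pvGoA, pvF]
  | cons c r ih =>
    intro pre res stk
    have hget : PySem.List.pyGet? (pre ++ c :: r) ((pre.length : Int) + 1) = r.head? := by
      rw [show ((pre.length : Int) + 1) = ((pre.length + 1 : Nat) : Int) by push_cast; ring,
          PySem.List.pyGet?_natCast]
      rw [List.getElem?_append_right (by omega)]
      simp [List.head?_eq_getElem?]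
    have hstep : ∀ res' stk', (pvGoA (pre ++ c :: r) r ((pre.length : Int) + 1) (res', stk')).1
        = res' ++ pvF r (stk'.length : Int) := by
      intro res' stk'
      have h := ih (pre ++ [c]) res' stk'
      simpa [List.append_assoc, Nat.cast_add] using h
    simp only [pvGoA, pvF]
    by_cases h1 : c = '('
    · simp only [if_pos h1]
      by_cases h2 : r.head? = some '\n'
      · have hlt : (pre.length : Int) + 1 < ((pre ++ c :: r).length : Int) := by
          cases r with
          | nil => simp [List.head?] at h2
          | cons _ _ => simp
        rw [if_pos ⟨hlt, hget.trans h2⟩, if_pos h2, hstep]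
      · have hng : ¬ ((pre.length : Int) + 1 < ((pre ++ c :: r).length : Int)
            ∧ PySem.List.pyGet? (pre ++ c :: r) ((pre.length : Int) + 1) = some '\n') := by
          rw [hget]; tauto
        rw [if_neg hng, if_neg h2, hstep]
        simp [List.append_assoc, List.length_append]
    by_cases h2 : c = ')'
    · simp only [if_neg h1, if_pos h2]
      by_cases h3 : stk ≠ []
      · have hpos : (stk.length : Int) > 0 := by
          cases stk with | nil => simp at h3 | cons _ _ => simp
        rw [if_pos h3, if_pos hpos, hstep]
        have hlen : (stk.dropLast.length : Int) = (stk.length : Int) - 1 := by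
          have hge : stk.length ≥ 1 := by cases stk with | nil => simp at h3 | cons _ _ => simp
          simp [List.length_dropLast]; omega
        rw [hlen, List.append_assoc]
        rfl
      · have hnp : ¬ ((stk.length : Int) > 0) := by
          simp at h3; subst h3; simp
        rw [if_neg h3, if_neg hnp, hstep]
    · simp only [if_neg h1, if_neg h2, hstep, List.append_assoc]
      rfl

-- ===== VERDICT (by name: the statement is the Claim_ definition above) =====
theorem remove_unnecessary_parentheses_v6_spec : Claim_equal_remove_unnecessary_parentheses_v6 := by
  intro text _
  unfold Spec_remove_unnecessary_parentheses_v6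
  unfold remove_unnecessary_parentheses_v6 remove_unnecessary_parentheses_v6_alt
  have hA := pvGoA_eq_pvF text.toList [] [] []
  simp only [List.nil_append, List.length_nil, Nat.cast_zero] at hA
  rw [hA, pass1_eq_pvG, pass2_eq_pvF2, pvF2_pvG]
  simp
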